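-- pv_equiv track=rewrite | github.com/kennethsolomon/shipkit | setup-optimizer/lib/merge.py | reconstruct_claude_md
-- ===== SOURCE A (Python) =====
-- from typing import Dict, Tuple
--
-- def reconstruct_claude_md(
--     sections: Dict[str, str],
--     include_marker: bool = True,
-- ) -> str:
--     """Reconstruct CLAUDE.md from sections.
--
--     Args:
--         sections: Dict of section_name -> content
--         include_marker: Whether to add generation marker
--
--     Returns:
--         Reconstructed CLAUDE.md content
--     """
--     # Define standard section order
--     section_order = [
--         'Project Header',  # Placeholder for title/description
--         'Stack',
--         'Quick Start',
--         'Key Directories',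
--         'Documentation & Resources',
--         'Development',
--         'Common Workflows',
--         'Build & Deploy',
--         'Important Context',
--         'Environment Variables',
--         'Common Tasks',
--     ]
--
--     lines = []
--
--     # Add sections in order (putting unordered sections at end)
--     added_sections = set()
--     for section_name in section_order:
--         if section_name in sections and section_name not in added_sections:
--             content = sections[section_name].strip()
--             if content:
--                 lines.append(f'## {section_name}')
--                 lines.append('')
--                 lines.append(content)
--                 lines.append('')
--                 added_sections.add(section_name)
--
--     # Add any remaining sections
--     for section_name in sorted(sections.keys()):
--         if section_name not in added_sections:
--             content = sections[section_name].strip()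
--             if content:
--                 lines.append(f'## {section_name}')
--                 lines.append('')
--                 lines.append(content)
--                 lines.append('')
--
--     # Add marker
--     if include_marker:
--         lines.append('<!-- Generated by /setup-claude-tools -->')
--
--     result = '\n'.join(lines).strip()
--     return result + '\n'
-- ===== SOURCE B (Python) =====
-- def reconstruct_claude_md(sections, include_marker=True):
--     section_order = [
--         'Project Header',
--         'Stack',
--         'Quick Start',
--         'Key Directories',
--         'Documentation & Resources',
--         'Development',
--         'Common Workflows',
--         'Build & Deploy',
--         'Important Context',
--         'Environment Variables',
--         'Common Tasks',
--     ]
--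
--     def sort_key(name):
--         # rank in the standard order; unknown sections rank last, tie-broken by name
--         try:
--             return (section_order.index(name), name)
--         except ValueError:
--             return (len(section_order), name)
--
--     lines = []
--     for name in sorted(sections, key=sort_key):
--         content = sections[name].strip()
--         if content:
--             lines.extend(('## ' + name, '', content, ''))
--     if include_marker:
--         lines.append('<!-- Generated by /setup-claude-tools -->')
--     return '\n'.join(lines).strip() + '\n'
-- ===== Notes on version B (the rewrite author's own statement) =====
-- stated objective: alternative
-- what changed: B replaces A's two-phase emission (scan of the fixed order list with a visited-set, then a second loop over the sorted leftover keys) by a single comparison-key sort: every key gets a (rank-in-standard-order, name) tuple key, one sorted() call orders all keys at once, and one uniform pass formats them.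
import Mathlib
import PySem

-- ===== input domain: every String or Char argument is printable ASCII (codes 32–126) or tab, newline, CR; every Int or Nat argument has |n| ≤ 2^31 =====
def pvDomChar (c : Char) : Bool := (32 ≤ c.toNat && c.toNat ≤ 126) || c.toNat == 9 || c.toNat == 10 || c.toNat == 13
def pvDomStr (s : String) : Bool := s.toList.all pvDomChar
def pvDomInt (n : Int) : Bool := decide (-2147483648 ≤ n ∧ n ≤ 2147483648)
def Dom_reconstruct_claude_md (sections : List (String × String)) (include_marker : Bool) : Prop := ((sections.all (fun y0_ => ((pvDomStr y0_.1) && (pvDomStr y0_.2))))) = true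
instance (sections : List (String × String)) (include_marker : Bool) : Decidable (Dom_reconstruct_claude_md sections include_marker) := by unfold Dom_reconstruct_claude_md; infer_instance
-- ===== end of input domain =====

-- B replaces A's two-phase emission (order-list scan with a visited-set, then a loop over the
-- sorted leftover keys) by ONE sort of all keys under a (rank, name) comparison key and one
-- uniform formatting pass; same return value.

-- ===== PORT A =====
def pvSectionOrder : List String :=
  ["Project Header", "Stack", "Quick Start", "Key Directories",
   "Documentation & Resources", "Development", "Common Workflows",
   "Build & Deploy", "Important Context", "Environment Variables", "Common Tasks"]

-- one iteration of A's first loop: state = (lines, added_sections)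
def pvAStep1 (d : PySem.Dict String String) (st : List String × PySem.Set String)
    (name : String) : List String × PySem.Set String :=
  if d.contains name && !(PySem.Set.contains st.2 name) then
    let content := PySem.Str.strip (d.getD name "")
    if content ≠ "" then
      (st.1 ++ ["## " ++ name, "", content, ""], PySem.Set.add st.2 name)
    else st
  else st

-- one iteration of A's second loop (added_sections is no longer modified there)
def pvAStep2 (d : PySem.Dict String String) (added : PySem.Set String)
    (lines : List String) (name : String) : List String :=
  if !(PySem.Set.contains added name) then
    let content := PySem.Str.strip (d.getD name "")
    if content ≠ "" then lines ++ ["## " ++ name, "", content, ""]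
    else lines
  else lines

def reconstruct_claude_md (sections : List (String × String)) (include_marker : Bool) : String :=
  let d := PySem.Dict.ofList sections
  let st := pvSectionOrder.foldl (pvAStep1 d) ([], PySem.Set.empty)
  let lines := (PySem.List.sorted d.keys (fun x => x) false).foldl (pvAStep2 d st.2) st.1
  let lines := if include_marker then lines ++ ["<!-- Generated by /setup-claude-tools -->"] else lines
  PySem.Str.strip (PySem.Str.join "\n" lines) ++ "\n"

-- ===== PORT B =====
-- B's sort_key: (index of name in the standard order, or its length when absent; the name)
def pvRank (name : String) : Nat :=
  (PySem.List.index? pvSectionOrder name).getD pvSectionOrder.length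

-- one iteration of B's single formatting loop
def pvBStep (d : PySem.Dict String String) (lines : List String) (name : String) : List String :=
  let content := PySem.Str.strip (d.getD name "")
  if content ≠ "" then lines ++ ["## " ++ name, "", content, ""]
  else lines

def reconstruct_claude_md_alt (sections : List (String × String)) (include_marker : Bool) : String :=
  let d := PySem.Dict.ofList sections
  let lines := (PySem.List.sorted2 d.keys pvRank (fun n => n) false).foldl (pvBStep d) []
  let lines := if include_marker then lines ++ ["<!-- Generated by /setup-claude-tools -->"] else lines
  PySem.Str.strip (PySem.Str.join "\n" lines) ++ "\n"

-- ===== PRECONDITION & SPEC =====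
def Spec_reconstruct_claude_md (sections : List (String × String)) (include_marker : Bool) (out : String) : Prop := out = reconstruct_claude_md_alt sections include_marker
instance (sections : List (String × String)) (include_marker : Bool) (out : String) : Decidable (Spec_reconstruct_claude_md sections include_marker out) := by unfold Spec_reconstruct_claude_md; infer_instance

-- ===== CLAIM (what is proved, stated in full; the proofs are below) =====
def Claim_equal_reconstruct_claude_md : Prop := ∀ (sections : List (String × String)) (include_marker : Bool), Dom_reconstruct_claude_md sections include_marker → Spec_reconstruct_claude_md sections include_marker (reconstruct_claude_md sections include_marker)

-- ===== LEMMAS AND PROOFS =====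

-- the formatted block of one section, and the "this section is emitted" test
def pvBlock (d : PySem.Dict String String) (name : String) : List String :=
  ["## " ++ name, "", PySem.Str.strip (d.getD name ""), ""]

def pvNonempty (d : PySem.Dict String String) (name : String) : Bool :=
  decide (PySem.Str.strip (d.getD name "") ≠ "")

def pvGood (d : PySem.Dict String String) (name : String) : Bool :=
  d.contains name && pvNonempty d name

theorem pvAStep1_char (d : PySem.Dict String String) :
    ∀ (l : List String) (lines : List String) (added : PySem.Set String),
      l.Nodup → (∀ n ∈ l, n ∉ added) →
      l.foldl (pvAStep1 d) (lines, added) =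
        (lines ++ (l.filter (pvGood d)).flatMap (pvBlock d), added ++ l.filter (pvGood d)) := by
  intro l
  induction l with
  | nil => intro lines added _ _; simp
  | cons n l ih =>
    intro lines added hnd hdisj
    have hn : n ∉ added := hdisj n (by simp)
    rw [List.foldl_cons]
    by_cases hc : d.contains n = true
    · by_cases hne : PySem.Str.strip (d.getD n "") ≠ ""
      · have hstep : pvAStep1 d (lines, added) n =
            (lines ++ pvBlock d n, added ++ [n]) := by
          simp [pvAStep1, hc, hn, hne, pvBlock]
        rw [hstep, ih (lines ++ pvBlock d n) (added ++ [n]) hnd.of_cons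
            (by intro m hm; simp; exact ⟨hdisj m (by simp [hm]),
              fun h => (List.nodup_cons.mp hnd).1 (h ▸ hm)⟩)]
        have hg : pvGood d n = true := by simp [pvGood, pvNonempty, hc, hne]
        simp [hg, List.append_assoc]
      · have hstep : pvAStep1 d (lines, added) n = (lines, added) := by
          simp [pvAStep1, hc, hn, hne]
        rw [hstep, ih lines added hnd.of_cons
            (fun m hm => hdisj m (by simp [hm]))]
        have hg : pvGood d n = false := by simp [pvGood, pvNonempty, hne]
        simp [hg]
    · have hstep : pvAStep1 d (lines, added) n = (lines, added) := by
        simp [pvAStep1, hc]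
      rw [hstep, ih lines added hnd.of_cons
          (fun m hm => hdisj m (by simp [hm]))]
      have hg : pvGood d n = false := by simp [pvGood, hc]
      simp [hg]

theorem pvAStep2_char (d : PySem.Dict String String) (added : PySem.Set String) :
    ∀ (l : List String) (lines : List String),
      l.foldl (pvAStep2 d added) lines =
        lines ++ (l.filter (fun n => !(PySem.Set.contains added n) && pvNonempty d n)).flatMap (pvBlock d) := by
  intro l
  induction l with
  | nil => intro lines; simp
  | cons n l ih =>
    intro lines
    rw [List.foldl_cons, ih]
    by_cases ha : n ∈ added
    · simp [pvAStep2, ha]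
    · by_cases hne : PySem.Str.strip (d.getD n "") ≠ ""
      · simp [pvAStep2, ha, hne, pvNonempty, pvBlock, List.append_assoc]
      · simp [pvAStep2, ha, hne, pvNonempty]

theorem pvBStep_char (d : PySem.Dict String String) :
    ∀ (l : List String) (lines : List String),
      l.foldl (pvBStep d) lines =
        lines ++ (l.filter (pvNonempty d)).flatMap (pvBlock d) := by
  intro l
  induction l with
  | nil => intro lines; simp
  | cons n l ih =>
    intro lines
    rw [List.foldl_cons, ih]
    by_cases hne : PySem.Str.strip (d.getD n "") ≠ ""
    · simp [pvBStep, hne, pvNonempty, pvBlock, List.append_assoc]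
    · simp [pvBStep, hne, pvNonempty]

-- sorting commutes with filtering (keys are distinct)
theorem pv_sorted_filter (xs : List String) (p : String → Bool) (hnd : xs.Nodup) :
    PySem.List.sorted (xs.filter p) (fun x => x) false =
      (PySem.List.sorted xs (fun x => x) false).filter p := by
  apply PySem.List.sorted_eq_of_perm_of_pairwise_lt
  · exact (PySem.List.sorted_perm xs (fun x => x) false).filter p
  · have hperm := PySem.List.sorted_perm xs (fun x => x) false
    have hnd' : (PySem.List.sorted xs (fun x => x) false).Nodup := hperm.nodup_iff.mpr hnd
    have hle := PySem.List.sorted_pairwise xs (fun x => x)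
    exact ((hle.and hnd').imp (fun h => lt_of_le_of_ne h.1 h.2)).filter p

theorem pvRank_of_not_mem (b : String) (hnb : b ∉ pvSectionOrder) :
    pvRank b = pvSectionOrder.length := by
  have h : List.idxOf? b pvSectionOrder = none :=
    List.idxOf?_eq_none_iff.mpr (by simpa using hnb)
  simp [pvRank, PySem.List.index?_eq_idxOf?, h]

-- a tuple-key sort is a sort under the lexicographic order on the pair of keys
theorem pv_sorted2_eq_sorted_lex {α : Type} (xs : List α) (k1 : α → Nat) (k2 : α → String) :
    PySem.List.sorted2 xs k1 k2 false =
      PySem.List.sorted xs (fun x => toLex (k1 x, k2 x)) false := by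
  have hbef : (fun a b => decide (k1 a < k1 b) || (!decide (k1 b < k1 a) && decide (k2 a < k2 b)))
      = (fun a b : α => decide ((toLex (k1 a, k2 a) : Lex (Nat × String)) < toLex (k1 b, k2 b))) := by
    funext a b
    rcases lt_trichotomy (k1 a) (k1 b) with h | h | h
    · simp [Prod.Lex.lt_iff, h, not_lt_of_gt h]
    · simp [Prod.Lex.lt_iff, h]
    · simp [Prod.Lex.lt_iff, h, not_lt_of_gt h, (ne_of_gt h)]
  simp only [PySem.List.sorted2, PySem.List.sorted, Bool.false_eq_true, if_false, hbef]

-- the key order B's single sort produces = ordered names present, then leftover keys sorted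
theorem pv_sort_order (d : PySem.Dict String String) (hkeys : d.keys.Nodup) :
    PySem.List.sorted2 d.keys pvRank (fun n => n) false =
      pvSectionOrder.filter (fun n => d.contains n) ++
        PySem.List.sorted (d.keys.filter (fun k => !(pvSectionOrder.contains k))) (fun x => x) false := by
  rw [pv_sorted2_eq_sorted_lex]
  apply PySem.List.sorted_eq_of_perm_of_pairwise_lt
  · -- permutation with d.keys
    have h1 : List.Perm (pvSectionOrder.filter (fun n => d.contains n))
        (d.keys.filter (fun k => pvSectionOrder.contains k)) := by
      rw [List.perm_ext_iff_of_nodup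
        ((by decide : pvSectionOrder.Nodup).filter _) (hkeys.filter _)]
      intro a
      simp only [List.mem_filter, PySem.Dict.contains_iff_mem_keys, List.contains_iff_mem,
        and_comm]
    exact (h1.append (PySem.List.sorted_perm _ _ _)).trans (List.filter_append_perm _ _)
  · -- strictly increasing lexicographic keys along the target list
    rw [List.pairwise_append]
    refine ⟨?_, ?_, ?_⟩
    · -- within the ordered prefix: ranks strictly increase along pvSectionOrder
      have hord : pvSectionOrder.Pairwise (fun a b => pvRank a < pvRank b) := by decide
      exact (hord.filter _).imp (fun h => Prod.Lex.lt_iff.mpr (Or.inl h))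
    · -- within the sorted suffix: equal ranks, strictly increasing names
      have hnd' : (PySem.List.sorted (d.keys.filter (fun k => !(pvSectionOrder.contains k))) (fun x => x) false).Nodup :=
        (PySem.List.sorted_perm _ _ _).nodup_iff.mpr (hkeys.filter _)
      have hle := PySem.List.sorted_pairwise (d.keys.filter (fun k => !(pvSectionOrder.contains k))) (fun x => x)
      refine ((hle.and hnd').imp_of_mem ?_)
      intro a b ha hb h
      have hna : a ∉ pvSectionOrder := by
        have := (List.mem_filter.mp ((PySem.List.mem_sorted _ _ _ _).mp ha)).2
        simpa [List.contains_iff_mem] using this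
      have hnb : b ∉ pvSectionOrder := by
        have := (List.mem_filter.mp ((PySem.List.mem_sorted _ _ _ _).mp hb)).2
        simpa [List.contains_iff_mem] using this
      exact Prod.Lex.lt_iff.mpr (Or.inr ⟨by simp [pvRank_of_not_mem a hna, pvRank_of_not_mem b hnb],
        lt_of_le_of_ne h.1 h.2⟩)
    · -- across: any ordered name outranks… is outranked by any leftover name
      intro a ha b hb
      have hra : pvRank a < pvSectionOrder.length := by
        have ha' : a ∈ pvSectionOrder := (List.mem_filter.mp ha).1
        have : ∀ x ∈ pvSectionOrder, pvRank x < pvSectionOrder.length := by decide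
        exact this a ha'
      have hrb : pvRank b = pvSectionOrder.length := by
        have hb' : b ∈ d.keys.filter (fun k => !(pvSectionOrder.contains k)) :=
          (PySem.List.mem_sorted _ _ _ _).mp hb
        have hnb : b ∉ pvSectionOrder := by
          have := (List.mem_filter.mp hb').2
          simpa [List.contains_iff_mem] using this
        exact pvRank_of_not_mem b hnb
      exact Prod.Lex.lt_iff.mpr (Or.inl (hrb ▸ hra))

-- both programs' line lists are the same canonical flatMap over the same key order
theorem pv_lines_eq (d : PySem.Dict String String) (hkeys : d.keys.Nodup) :
    (PySem.List.sorted d.keys (fun x => x) false).foldl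
        (pvAStep2 d (pvSectionOrder.foldl (pvAStep1 d) ([], PySem.Set.empty)).2)
        (pvSectionOrder.foldl (pvAStep1 d) ([], PySem.Set.empty)).1 =
      (PySem.List.sorted2 d.keys pvRank (fun n => n) false).foldl (pvBStep d) [] := by
  have hordnd : pvSectionOrder.Nodup := by decide
  rw [pv_sort_order d hkeys]
  rw [pvAStep1_char d pvSectionOrder [] PySem.Set.empty hordnd (fun n _ h => List.not_mem_nil h)]
  rw [pvAStep2_char, pvBStep_char, List.filter_append, List.flatMap_append]
  simp only [List.nil_append]
  have hfirst : pvSectionOrder.filter (pvGood d) =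
      (pvSectionOrder.filter (fun n => d.contains n)).filter (pvNonempty d) := by
    rw [List.filter_filter]
    apply List.filter_congr
    intro n _
    simp only [pvGood]
    exact (Bool.and_comm _ _).symm
  have hsecond :
      (PySem.List.sorted d.keys (fun x => x) false).filter
        (fun n => !(PySem.Set.contains (PySem.Set.empty ++ pvSectionOrder.filter (pvGood d)) n) && pvNonempty d n) =
      (PySem.List.sorted (d.keys.filter (fun k => !(pvSectionOrder.contains k))) (fun x => x) false).filter
        (pvNonempty d) := by
    rw [pv_sorted_filter _ _ hkeys, List.filter_filter]
    apply List.filter_congr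
    intro n hn
    have hnk : n ∈ d.keys := (PySem.List.mem_sorted _ _ _ _).mp hn
    have hcont : d.contains n = true := (PySem.Dict.contains_iff_mem_keys d n).mpr hnk
    by_cases hne : pvNonempty d n = true
    · have hmem : PySem.Set.contains (PySem.Set.empty ++ pvSectionOrder.filter (pvGood d)) n = pvSectionOrder.contains n := by
        simp only [PySem.Set.empty, List.nil_append, PySem.Set.contains_eq_listContains]
        by_cases ho : n ∈ pvSectionOrder
        · have : n ∈ pvSectionOrder.filter (pvGood d) := by
            rw [List.mem_filter]
            exact ⟨ho, by simp [pvGood, hcont, hne]⟩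
          simp [this, ho]
        · have : n ∉ pvSectionOrder.filter (pvGood d) := fun h => ho (List.mem_filter.mp h).1
          simp [this, ho]
      rw [hmem, hne]
      simp [Bool.and_comm]
    · simp only [Bool.not_eq_true] at hne
      simp [hne]
  rw [hsecond, hfirst]

-- ===== VERDICT (by name: the statement is the Claim_ definition above) =====
theorem reconstruct_claude_md_spec : Claim_equal_reconstruct_claude_md := by
  intro sections include_marker _
  simp only [Spec_reconstruct_claude_md, reconstruct_claude_md, reconstruct_claude_md_alt]
  rw [pv_lines_eq (PySem.Dict.ofList sections) (PySem.Dict.nodup_keys_ofList sections)]
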